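-- pv_equiv track=rewrite | github.com/TheoVangheluwe/Sprouts | Game/utils/move_verification.py | get_vertex_degrees
-- ===== SOURCE A (Python) =====
-- from collections import defaultdict
--
-- def parse_boundaries(chain):
--     boundaries = []
--     current_boundary = []
--
--     for char in chain:
--         if char.isalnum():
--             current_boundary.append(char)
--         elif char in {'.', '}'}:
--             if current_boundary:
--                 boundaries.append(current_boundary)
--                 current_boundary = []
--         elif char == '!':
--             break  # fin de la position
--
--     return boundaries
--
-- def get_vertex_degrees(chain): #utilisation modulaire necessitant seulement la chaine (pas comme avant où on prenait le res de parse_boundaries)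
--     boundaries = parse_boundaries(chain) #modularisation avec fct preced
--     degree = defaultdict(int)
--     appearance_count = defaultdict(int)
--     single_vertex_boundaries = set()
--
--     forbidden = {'.', '}', '!'}
--
--     for boundary in boundaries:
--         for v in boundary:
--             if v in forbidden: #ignore les "marqueurs" {'.', '}', '!'}
--                 continue
--             appearance_count[v] += 1 #compteur
--         if len(boundary) == 1 and boundary[0] not in forbidden: #if : boundary taille == 1 & pas un marqueur : on ajoute le sommet à un set de sommets uniques
--             single_vertex_boundaries.add(boundary[0])
--
--     for v, count in appearance_count.items():
--         if count == 1 and v in single_vertex_boundaries: #si degre == 1 et sommet unique : on le met à 0 (ambigueté degré 0 et 1)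
--             degree[v] = 0
--         else: #normal
--             degree[v] = count
--
--     return degree
-- ===== SOURCE B (Python) =====
-- from collections import defaultdict, Counter
--
-- def get_vertex_degrees(chain):
--     # Declarative string pipeline instead of a char-by-char state machine:
--     # truncate at '!', normalize both closers to '.', split, then Counter.
--     pos = chain.split('!')[0]
--     dotted = ''.join(c if c.isalnum() else '.'
--                      for c in pos if c.isalnum() or c in '.}')
--     # every '.' in `dotted` closes a boundary; the piece after the last '.'
--     # is unclosed, so drop it; empty pieces are not boundaries
--     boundaries = [b for b in dotted.split('.')[:-1] if b]
--     counts = Counter(''.join(boundaries))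
--     singles = {b for b in boundaries if len(b) == 1}
--     return defaultdict(int, {v: 0 if n == 1 and v in singles else n
--                              for v, n in counts.items()})
-- ===== Notes on version B (the rewrite author's own statement) =====
-- stated objective: alternative
-- what changed: B drops A's character-level parser state machine (explicit current-boundary accumulator, then two counting loops) and instead runs a declarative string pipeline: truncate at '!', map every closer '.'/'}' to '.' while filtering out other non-alphanumerics, split the normalized string on '.', drop the unclosed last piece, then count with collections.Counter and apply the degree-0 rule in one dict comprehension.
import Mathlib
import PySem

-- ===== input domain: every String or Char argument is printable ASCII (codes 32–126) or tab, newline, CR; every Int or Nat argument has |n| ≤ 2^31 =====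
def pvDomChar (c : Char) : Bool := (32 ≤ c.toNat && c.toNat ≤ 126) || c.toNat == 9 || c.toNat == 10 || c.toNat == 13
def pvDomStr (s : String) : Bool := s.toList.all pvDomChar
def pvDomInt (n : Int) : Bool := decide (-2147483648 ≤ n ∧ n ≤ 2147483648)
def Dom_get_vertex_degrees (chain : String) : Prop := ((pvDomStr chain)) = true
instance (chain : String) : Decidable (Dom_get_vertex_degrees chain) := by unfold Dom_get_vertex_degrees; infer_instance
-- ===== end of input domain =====

-- B replaces A's char-by-char parser state machine with a string pipeline (truncate at '!',
-- normalize closers to '.', split on '.', Counter); objective: alternative decomposition, same cost.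

-- ===== PORT A =====
-- parse_boundaries: chars grouped between '.'/'}' markers, '!' ends the position
def pvParseBoundaries : List Char → List (List Char) → List Char → List (List Char)
  | [], bs, _ => bs
  | c :: rest, bs, cur =>
    if PySem.Chars.isalnum c then pvParseBoundaries rest bs (cur ++ [c])
    else if c == '.' || c == '}' then
      if cur.isEmpty then pvParseBoundaries rest bs cur
      else pvParseBoundaries rest (bs ++ [cur]) []
    else if c == '!' then bs
    else pvParseBoundaries rest bs cur

-- body of A's first loop: count appearances (skipping forbidden markers) and collect
-- single-vertex boundaries
def pvCountStep (st : PySem.Dict Char Int × PySem.Set Char) (boundary : List Char) :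
    PySem.Dict Char Int × PySem.Set Char :=
  let ac := boundary.foldl
    (fun d v => if v == '.' || v == '}' || v == '!' then d else d.modify v 0 (· + 1)) st.1
  let sv := if boundary.length == 1 && !(boundary[0]! == '.' || boundary[0]! == '}' || boundary[0]! == '!')
    then PySem.Set.add st.2 boundary[0]! else st.2
  (ac, sv)

def get_vertex_degrees (chain : String) : List (String × Int) :=
  let boundaries := pvParseBoundaries chain.toList [] []
  let st := boundaries.foldl pvCountStep (PySem.Dict.empty, PySem.Set.empty)
  let degree := st.1.items.foldl
    (fun d p => d.insert p.1 (if p.2 == 1 && PySem.Set.contains st.2 p.1 then (0 : Int) else p.2))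
    PySem.Dict.empty
  degree.items.map (fun p => (String.ofList [p.1], p.2))

-- ===== PORT B =====
-- the normalizing generator expression: alnum chars kept, '.'/'}' become '.', the rest dropped
def pvTr (c : Char) : Option Char :=
  if PySem.Chars.isalnum c then some c
  else if c == '.' || c == '}' then some '.'
  else none

def get_vertex_degrees_alt (chain : String) : List (String × Int) :=
  -- chain.split('!')[0]: split never returns an empty list, so [0] is its head
  let pos := (PySem.Chars.splitOn chain.toList ['!']).headD []
  -- ''.join(c if c.isalnum() else '.' for c in pos if c.isalnum() or c in '.}')
  let dotted := pos.filterMap pvTr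
  -- dotted.split('.')[:-1], empty pieces dropped
  let boundaries := ((PySem.Chars.splitOn dotted ['.']).dropLast).filter (fun b => !b.isEmpty)
  -- Counter(''.join(boundaries))
  let counts := PySem.Dict.counter boundaries.flatten
  -- {b for b in boundaries if len(b) == 1}
  let singles := PySem.Set.ofList (boundaries.filter (fun b => b.length == 1))
  -- the dict comprehension inserts counts' keys in order
  let degree := counts.items.foldl
    (fun d p => d.insert p.1 (if p.2 == 1 && PySem.Set.contains singles [p.1] then (0 : Int) else p.2))
    PySem.Dict.empty
  degree.items.map (fun p => (String.ofList [p.1], p.2))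

-- ===== PRECONDITION & SPEC =====
def Spec_get_vertex_degrees (chain : String) (out : List (String × Int)) : Prop := out = get_vertex_degrees_alt chain
instance (chain : String) (out : List (String × Int)) : Decidable (Spec_get_vertex_degrees chain out) := by unfold Spec_get_vertex_degrees; infer_instance

-- ===== CLAIM (what is proved, stated in full; the proofs are below) =====
def Claim_equal_get_vertex_degrees : Prop := ∀ (chain : String), Dom_get_vertex_degrees chain → Spec_get_vertex_degrees chain (get_vertex_degrees chain)

-- ===== LEMMAS AND PROOFS =====

-- structural form of single-character split (Python keeps empty pieces)
def pvSplitChar (d : Char) : List Char → List (List Char)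
  | [] => [[]]
  | c :: rest =>
    if c == d then [] :: pvSplitChar d rest
    else match pvSplitChar d rest with
      | [] => [[c]]
      | p :: ps => (c :: p) :: ps

theorem pvSplitChar_ne_nil (d : Char) (l : List Char) : pvSplitChar d l ≠ [] := by
  cases l with
  | nil => simp [pvSplitChar]
  | cons c rest =>
    simp only [pvSplitChar]
    split
    · simp
    · split <;> simp

theorem pv_go_eq (d : Char) : ∀ (fuel : Nat) (l : List Char), l.length ≤ fuel →
    ∀ (cur : List Char) (acc : List (List Char)),
    PySem.Chars.splitOn.go [d] fuel l cur acc =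
      acc.reverse ++ (match pvSplitChar d l with
        | [] => []
        | p :: ps => (cur.reverse ++ p) :: ps) := by
  intro fuel
  induction fuel with
  | zero =>
    intro l hl cur acc
    interval_cases h : l.length
    have : l = [] := List.length_eq_zero_iff.mp h
    subst this
    simp [PySem.Chars.splitOn.go, pvSplitChar]
  | succ f ih =>
    intro l hl cur acc
    cases l with
    | nil => simp [PySem.Chars.splitOn.go, pvSplitChar]
    | cons c rest =>
      simp only [PySem.Chars.splitOn.go]
      by_cases hcd : c = d
      · subst hcd
        have hpre : [c].isPrefixOf (c :: rest) = true := by simp [List.isPrefixOf]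
        rw [if_pos hpre]
        simp only [List.length_cons, List.length_nil, List.drop_succ_cons, List.drop_zero]
        rw [ih rest (by simpa using hl) [] (cur.reverse :: acc)]
        rcases hsp : pvSplitChar c rest with _ | ⟨p, ps⟩
        · exact absurd hsp (pvSplitChar_ne_nil c rest)
        · simp [pvSplitChar, hsp]
      · have hpre : [d].isPrefixOf (c :: rest) = false := by
          simp [List.isPrefixOf]
          exact fun h => absurd h.symm hcd
        rw [if_neg (by simp [hpre])]
        rw [ih rest (by simpa using hl) (c :: cur) acc]
        rcases hsp : pvSplitChar d rest with _ | ⟨p, ps⟩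
        · exact absurd hsp (pvSplitChar_ne_nil d rest)
        · simp [pvSplitChar, hsp, hcd]

theorem pv_splitOn_eq (d : Char) (l : List Char) :
    PySem.Chars.splitOn l [d] = pvSplitChar d l := by
  unfold PySem.Chars.splitOn
  rw [pv_go_eq d (l.length + 1) l (by omega) [] []]
  rcases hsp : pvSplitChar d l with _ | ⟨p, ps⟩
  · exact absurd hsp (pvSplitChar_ne_nil d l)
  · simp

-- chain.split('!')[0] is the prefix before the first '!'
theorem pv_headD_splitChar (d : Char) (l : List Char) :
    (pvSplitChar d l).headD [] = l.takeWhile (fun c => !(c == d)) := by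
  induction l with
  | nil => simp [pvSplitChar]
  | cons c rest ih =>
    simp only [pvSplitChar, List.takeWhile]
    by_cases hcd : (c == d) = true
    · simp [hcd]
    · rcases hsp : pvSplitChar d rest with _ | ⟨p, ps⟩
      · exact absurd hsp (pvSplitChar_ne_nil d rest)
      · simp only [hcd, Bool.false_eq_true, ite_false, Bool.not_false]
        rw [← ih]
        simp [hsp]

-- an alphanumeric character is none of the three markers
theorem pv_alnum_not_marker (c : Char) (h : PySem.Chars.isalnum c = true) :
    (c == '.' || c == '}' || c == '!') = false := by
  simp only [Bool.or_eq_false_iff, beq_eq_false_iff_ne]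
  refine ⟨⟨fun hc => ?_, fun hc => ?_⟩, fun hc => ?_⟩ <;> subst hc <;>
    exact absurd h (by decide)

-- A's parser never reads past the first '!'
theorem pv_parse_takeWhile : ∀ (cs : List Char) (bs : List (List Char)) (cur : List Char),
    pvParseBoundaries cs bs cur = pvParseBoundaries (cs.takeWhile (fun c => !(c == '!'))) bs cur := by
  intro cs
  induction cs with
  | nil => intro bs cur; rfl
  | cons c rest ih =>
    intro bs cur
    by_cases hb : (c == '!') = true
    · have hc : c = '!' := by simpa using hb
      subst hc
      have h1 : PySem.Chars.isalnum '!' = false := by decide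
      simp [pvParseBoundaries, List.takeWhile, h1]
    · simp only [List.takeWhile, hb, Bool.not_false]
      simp only [pvParseBoundaries, hb, Bool.false_eq_true, ite_false]
      split
      · exact ih bs _
      · split
        · split
          · exact ih bs cur
          · exact ih (bs ++ [cur]) []
        · exact ih bs cur

-- parse_boundaries prepends its accumulator
theorem pv_parse_append (chars : List Char) :
    ∀ bs cur, pvParseBoundaries chars bs cur = bs ++ pvParseBoundaries chars [] cur := by
  induction chars with
  | nil => intro bs cur; simp [pvParseBoundaries]
  | cons c rest ih =>
    intro bs cur
    by_cases h1 : PySem.Chars.isalnum c = true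
    · simp only [pvParseBoundaries, h1, if_true]
      exact ih bs (cur ++ [c])
    · by_cases h2 : (c == '.' || c == '}') = true
      · by_cases h3 : cur.isEmpty
        · simp only [pvParseBoundaries, h1, h2, h3, if_true, Bool.false_eq_true, ite_false]
          exact ih bs cur
        · simp only [pvParseBoundaries, h1, h2, h3, if_true, Bool.false_eq_true, ite_false,
            List.nil_append]
          rw [ih (bs ++ [cur]), ih [cur]]
          simp
      · by_cases h4 : (c == '!') = true
        · simp [pvParseBoundaries, h1, h2, h4]
        · simp only [pvParseBoundaries, h1, h2, h4, Bool.false_eq_true, ite_false]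
          exact ih bs cur

-- A's parse of a '!'-free string IS B's normalize-split-dropLast-filter pipeline
theorem pv_parse_eq_pipeline : ∀ (cs : List Char), (∀ c ∈ cs, (c == '!') = false) →
    ∀ (cur : List Char),
    pvParseBoundaries cs [] cur =
      (match pvSplitChar '.' (cs.filterMap pvTr) with
       | [] => []
       | p :: ps => (((cur ++ p) :: ps).dropLast).filter (fun b => !b.isEmpty)) := by
  intro cs
  induction cs with
  | nil =>
    intro _ cur
    simp [pvParseBoundaries, pvSplitChar]
  | cons c rest ih =>
    intro hbang cur
    have hbrest : ∀ x ∈ rest, (x == '!') = false := fun x hx => hbang x (List.mem_cons_of_mem c hx)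
    by_cases h1 : PySem.Chars.isalnum c = true
    · have hdot : (c == '.') = false := by
        have := pv_alnum_not_marker c h1
        simp only [Bool.or_eq_false_iff] at this
        exact this.1.1
      have htr : pvTr c = some c := by unfold pvTr; rw [if_pos h1]
      simp only [pvParseBoundaries, h1, if_true, List.filterMap_cons, htr]
      rw [ih hbrest (cur ++ [c])]
      simp only [pvSplitChar, hdot, Bool.false_eq_true, ite_false]
      rcases hsp : pvSplitChar '.' (rest.filterMap pvTr) with _ | ⟨p, ps⟩
      · exact absurd hsp (pvSplitChar_ne_nil _ _)
      · simp
    · by_cases h2 : (c == '.' || c == '}') = true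
      · simp only [pvParseBoundaries, h1, h2, Bool.false_eq_true, ite_false, if_true]
        have htr : pvTr c = some '.' := by
          unfold pvTr; rw [if_neg (by simpa using h1), if_pos h2]
        simp only [List.filterMap_cons, htr]
        simp only [pvSplitChar, beq_self_eq_true, if_true]
        rcases hsp : pvSplitChar '.' (rest.filterMap pvTr) with _ | ⟨p, ps⟩
        · exact absurd hsp (pvSplitChar_ne_nil _ _)
        · by_cases h3 : cur.isEmpty
          · have hc : cur = [] := by simpa [List.isEmpty_iff] using h3
            subst hc
            simp only [if_pos h3]
            rw [ih hbrest []]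
            simp [hsp, List.dropLast_cons_of_ne_nil]
          · simp only [h3, Bool.false_eq_true, ite_false, List.nil_append]
            rw [pv_parse_append rest [cur] [], ih hbrest []]
            have hne : (cur.isEmpty = false) := by simpa using h3
            simp [hsp, List.dropLast_cons_of_ne_nil, hne]
      · have h4 : (c == '!') = false := hbang c (List.mem_cons_self)
        have htr : pvTr c = none := by
          unfold pvTr; rw [if_neg (by simpa using h1), if_neg (by simpa using h2)]
        simp only [pvParseBoundaries, h1, h2, h4, Bool.false_eq_true, ite_false,
          List.filterMap_cons, htr]
        exact ih hbrest cur

-- every char of every piece of a split comes from the string and is not the separator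
theorem pv_mem_splitChar (d : Char) : ∀ (l : List Char) (p : List Char), p ∈ pvSplitChar d l →
    ∀ v ∈ p, v ∈ l ∧ (v == d) = false := by
  intro l
  induction l with
  | nil =>
    intro p hp v hv
    simp [pvSplitChar] at hp
    subst hp
    simp at hv
  | cons c rest ih =>
    intro p hp v hv
    simp only [pvSplitChar] at hp
    by_cases hcd : (c == d) = true
    · simp only [hcd, if_true, List.mem_cons] at hp
      rcases hp with hp | hp
      · subst hp; simp at hv
      · rcases ih p hp v hv with ⟨hm, hne⟩
        exact ⟨List.mem_cons_of_mem c hm, hne⟩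
    · simp only [hcd, Bool.false_eq_true, ite_false] at hp
      rcases hsp : pvSplitChar d rest with _ | ⟨q, qs⟩
      · exact absurd hsp (pvSplitChar_ne_nil d rest)
      · rw [hsp] at hp
        simp only [List.mem_cons] at hp
        rcases hp with hp | hp
        · subst hp
          rcases List.mem_cons.mp hv with hv | hv
          · subst hv; exact ⟨List.mem_cons_self, by simpa using hcd⟩
          · rcases ih q (by rw [hsp]; exact List.mem_cons_self) v hv with ⟨hm, hne⟩
            exact ⟨List.mem_cons_of_mem c hm, hne⟩
        · rcases ih p (by rw [hsp]; exact List.mem_cons_of_mem q hp) v hv with ⟨hm, hne⟩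
          exact ⟨List.mem_cons_of_mem c hm, hne⟩

-- chars of B's boundaries are alphanumeric
theorem pv_boundary_alnum (dotted : List Char) (hd : ∀ v ∈ dotted, PySem.Chars.isalnum v = true ∨ v = '.')
    (b : List Char) (hb : b ∈ ((pvSplitChar '.' dotted).dropLast).filter (fun b => !b.isEmpty)) :
    ∀ v ∈ b, PySem.Chars.isalnum v = true := by
  intro v hv
  have hb' : b ∈ pvSplitChar '.' dotted :=
    List.dropLast_subset _ (List.mem_of_mem_filter hb)
  rcases pv_mem_splitChar '.' dotted b hb' v hv with ⟨hm, hne⟩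
  rcases hd v hm with h | h
  · exact h
  · subst h; simp at hne

-- on an all-alphanumeric boundary A's counting step splits into two independent updates
theorem pv_countStep_alnum (b : List Char) (st : PySem.Dict Char Int × PySem.Set Char)
    (hb : ∀ v ∈ b, PySem.Chars.isalnum v = true) :
    pvCountStep st b =
      (b.foldl (fun d v => d.modify v 0 (· + 1)) st.1,
       if b.length == 1 then PySem.Set.add st.2 b[0]! else st.2) := by
  unfold pvCountStep
  dsimp only
  refine Prod.ext ?_ ?_
  · dsimp only
    refine PySem.List.foldl_congr_mem' _ _ _ _ ?_
    intro v hv acc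
    rw [pv_alnum_not_marker v (hb v hv)]
    simp
  · dsimp only
    match b with
    | [] => rfl
    | [v] => simp [pv_alnum_not_marker v (hb v (by simp))]
    | v :: w :: t => rfl

-- adding to a set of singleton lists mirrors adding the character
theorem pv_contains_map_sing (s : PySem.Set Char) (v : Char) :
    PySem.Set.contains (s.map (fun c => [c])) [v] = PySem.Set.contains s v := by
  simp only [PySem.Set.contains, List.contains_eq_mem, List.mem_map, decide_eq_decide]
  constructor
  · rintro ⟨c, hc, hcv⟩
    obtain rfl : c = v := by simpa using hcv
    exact hc
  · exact fun h => ⟨v, h, rfl⟩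

theorem pv_add_map_sing (s : PySem.Set Char) (c : Char) :
    PySem.Set.add (s.map (fun x => [x])) [c] = (PySem.Set.add s c).map (fun x => [x]) := by
  simp only [PySem.Set.add, pv_contains_map_sing]
  by_cases h : PySem.Set.contains s c = true
  · rw [if_pos h, if_pos h]
  · rw [if_neg h, if_neg h]
    simp

-- B's singles set is A's single-vertex set, elementwise wrapped as one-char strings
theorem pv_set_rel : ∀ (bs : List (List Char)) (sA : PySem.Set Char), (∀ b ∈ bs, b ≠ []) →
    (bs.filter (fun b => b.length == 1)).foldl PySem.Set.add (sA.map (fun c => [c])) =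
      (bs.foldl (fun sv b => if b.length == 1 then PySem.Set.add sv b[0]! else sv) sA).map
        (fun c => [c]) := by
  intro bs
  induction bs with
  | nil => intro sA _; rfl
  | cons b rest ih =>
    intro sA hne
    have hner : ∀ x ∈ rest, x ≠ [] := fun x hx => hne x (List.mem_cons_of_mem b hx)
    by_cases hb1 : (b.length == 1) = true
    · obtain ⟨c, rfl⟩ : ∃ c, b = [c] := by
        match b, hb1 with
        | [c], _ => exact ⟨c, rfl⟩
      simp only [List.filter_cons, hb1, if_true, List.foldl_cons]
      rw [show ([c] : List Char)[0]! = c from rfl, pv_add_map_sing]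
      exact ih (PySem.Set.add sA c) hner
    · simp only [List.filter_cons, hb1, Bool.false_eq_true, ite_false, List.foldl_cons]
      exact ih sA hner

-- ===== VERDICT (by name: the statement is the Claim_ definition above) =====
theorem get_vertex_degrees_spec : Claim_equal_get_vertex_degrees := by
  intro chain _
  unfold Spec_get_vertex_degrees get_vertex_degrees get_vertex_degrees_alt
  dsimp only
  -- identify the boundary lists
  set pos := (PySem.Chars.splitOn chain.toList ['!']).headD [] with hpos
  have hposW : pos = chain.toList.takeWhile (fun c => !(c == '!')) := by
    rw [hpos, pv_splitOn_eq, pv_headD_splitChar]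
  have hbang : ∀ c ∈ pos, (c == '!') = false := by
    intro c hc
    rw [hposW] at hc
    simpa using List.mem_takeWhile_imp hc
  set dotted := pos.filterMap pvTr with hdot
  set bsB := ((PySem.Chars.splitOn dotted ['.']).dropLast).filter (fun b => !b.isEmpty) with hbsB
  have hbsB' : bsB = ((pvSplitChar '.' dotted).dropLast).filter (fun b => !b.isEmpty) := by
    rw [hbsB, pv_splitOn_eq]
  have hbs : pvParseBoundaries chain.toList [] [] = bsB := by
    rw [pv_parse_takeWhile, ← hposW, pv_parse_eq_pipeline pos hbang []]
    rcases hsp : pvSplitChar '.' dotted with _ | ⟨p, ps⟩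
    · exact absurd hsp (pvSplitChar_ne_nil _ _)
    · rw [hbsB', hsp]
      simp
  rw [hbs]
  -- boundary facts
  have halnum : ∀ b ∈ bsB, ∀ v ∈ b, PySem.Chars.isalnum v = true := by
    intro b hb
    refine pv_boundary_alnum dotted ?_ b (hbsB' ▸ hb)
    intro v hv
    rcases List.mem_filterMap.mp (hdot ▸ hv) with ⟨c, _, hc⟩
    by_cases h1 : PySem.Chars.isalnum c = true
    · left
      have htr : pvTr c = some c := by unfold pvTr; rw [if_pos h1]
      rw [htr] at hc
      cases hc
      exact h1
    · by_cases h2 : (c == '.' || c == '}') = true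
      · right
        have htr : pvTr c = some '.' := by
          unfold pvTr; rw [if_neg (by simpa using h1), if_pos h2]
        rw [htr] at hc
        cases hc
        rfl
      · have htr : pvTr c = none := by
          unfold pvTr; rw [if_neg (by simpa using h1), if_neg (by simpa using h2)]
        rw [htr] at hc
        cases hc
  have hne : ∀ b ∈ bsB, b ≠ [] := by
    intro b hb
    have := List.of_mem_filter hb
    simpa [List.isEmpty_iff] using this
  -- split A's state fold into the counter and the singles fold
  have hstateA : bsB.foldl pvCountStep (PySem.Dict.empty, PySem.Set.empty) =
      (PySem.Dict.counter bsB.flatten,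
       bsB.foldl (fun sv b => if b.length == 1 then PySem.Set.add sv b[0]! else sv)
         PySem.Set.empty) := by
    rw [PySem.List.foldl_congr_mem' bsB pvCountStep
      (fun st b => (b.foldl (fun d v => d.modify v 0 (· + 1)) st.1,
        if b.length == 1 then PySem.Set.add st.2 b[0]! else st.2))
      (PySem.Dict.empty, PySem.Set.empty)
      (fun b hb st => pv_countStep_alnum b st (halnum b hb))]
    rw [PySem.Dict.counter_eq_foldl, List.foldl_flatten]
    exact PySem.List.foldl_prod_mk
      (fun (d : PySem.Dict Char Int) (b : List Char) => b.foldl (fun d v => d.modify v 0 (· + 1)) d)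
      (fun (sv : PySem.Set Char) (b : List Char) =>
        if b.length == 1 then PySem.Set.add sv b[0]! else sv)
      bsB PySem.Dict.empty PySem.Set.empty
  rw [hstateA]
  -- B's singles set mirrors A's single-vertex set
  have hsing : PySem.Set.ofList (bsB.filter (fun b => b.length == 1)) =
      (bsB.foldl (fun sv b => if b.length == 1 then PySem.Set.add sv b[0]! else sv)
        PySem.Set.empty).map (fun c => [c]) := by
    rw [PySem.Set.ofList_eq_foldl]
    exact pv_set_rel bsB PySem.Set.empty hne
  rw [hsing]
  simp only [pv_contains_map_sing]
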